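-- pv_equiv track=rewrite | github.com/galacticor/Kuliah | TP2-DDP1.py | buang_tanda
-- ===== SOURCE A (Python) =====
-- import string
--
-- def buang_tanda(teks):
-- 	ret_teks = []
-- 	kata_baru = ''
-- 	for kata in teks:
-- 		kata_baru = kata
-- 		for char in string.punctuation:
-- 			kata_baru = kata_baru.replace(char,"")
-- 		ret_teks.append(kata_baru.lower())
-- 	return ret_teks
-- ===== SOURCE B (Python) =====
-- import string
--
-- def buang_tanda(teks):
--     puncts = set(string.punctuation)
--     ret_teks = []
--     for kata in teks:
--         ret_teks.append(''.join(c for c in kata if c not in puncts).lower())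
--     return ret_teks
-- ===== Notes on version B (the rewrite author's own statement) =====
-- stated objective: idiomatic
-- what changed: Replaces the 32 sequential str.replace passes per word with a single filtering pass over the word's characters against a precomputed punctuation set, joined and lowercased once.
import Mathlib
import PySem

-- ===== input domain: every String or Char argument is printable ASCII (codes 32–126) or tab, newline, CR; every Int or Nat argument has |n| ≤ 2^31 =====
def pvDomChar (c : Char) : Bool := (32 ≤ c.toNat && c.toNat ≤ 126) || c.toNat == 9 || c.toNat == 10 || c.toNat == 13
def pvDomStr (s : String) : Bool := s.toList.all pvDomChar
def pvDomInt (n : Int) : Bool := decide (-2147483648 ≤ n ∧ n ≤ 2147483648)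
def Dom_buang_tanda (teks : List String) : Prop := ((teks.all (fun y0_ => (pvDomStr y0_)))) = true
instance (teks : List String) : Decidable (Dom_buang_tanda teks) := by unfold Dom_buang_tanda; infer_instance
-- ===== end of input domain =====

-- B replaces A's 32 sequential str.replace passes per word with one filtering pass
-- over the word's characters against a precomputed punctuation set (idiomatic).


-- string.punctuation
def pvPunct : String := "!\"#$%&'()*+,-./:;<=>?@[\\]^_`{|}~"

-- ===== PORT A =====
def buang_tanda (teks : List String) : List String :=
  (teks.foldl (fun st kata =>
      let kata_baru := kata
      let kata_baru := pvPunct.toList.foldl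
        (fun k ch => PySem.Str.replace k (String.ofList [ch]) "") kata_baru
      (st.1 ++ [PySem.Str.lower kata_baru], kata_baru))
    (([], "") : List String × String)).1

-- ===== PORT B =====
def buang_tanda_alt (teks : List String) : List String :=
  let puncts : PySem.Set Char := PySem.Set.ofList pvPunct.toList
  teks.foldl (fun ret kata =>
      ret ++ [PySem.Str.lower (PySem.Str.join ""
        ((kata.toList.filter (fun c => !(puncts.contains c))).map (fun c => String.ofList [c])))])
    []

-- ===== PRECONDITION & SPEC =====
def Spec_buang_tanda (teks : List String) (out : List String) : Prop := out = buang_tanda_alt teks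
instance (teks : List String) (out : List String) : Decidable (Spec_buang_tanda teks out) := by unfold Spec_buang_tanda; infer_instance

-- ===== CLAIM (what is proved, stated in full; the proofs are below) =====
def Claim_equal_buang_tanda : Prop := ∀ (teks : List String), Dom_buang_tanda teks → Spec_buang_tanda teks (buang_tanda teks)

-- ===== LEMMAS AND PROOFS =====

-- replacing one char by "" is filtering that char out
theorem replace_go_single (c : Char) : ∀ (fuel : Nat) (l acc : List Char),
    l.length ≤ fuel →
    PySem.Chars.replace.go [c] [] fuel l acc = acc.reverse ++ l.filter (fun x => x != c) := by
  intro fuel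
  induction fuel with
  | zero => intro l acc h; cases l with
    | nil => simp [PySem.Chars.replace.go]
    | cons x t => simp at h
  | succ n ih =>
    intro l acc h
    cases l with
    | nil => simp [PySem.Chars.replace.go]
    | cons x t =>
      simp only [PySem.Chars.replace.go]
      by_cases hx : x = c
      · subst hx
        have : List.isPrefixOf [x] (x :: t) = true := by simp [List.isPrefixOf]
        rw [if_pos this]
        simp only [List.length, List.drop_succ_cons, List.drop_zero, List.reverse_nil,
          List.nil_append]
        rw [ih t acc (by simpa using Nat.le_of_succ_le_succ h)]
        simp
      · have : List.isPrefixOf [c] (x :: t) = false := by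
          simp [List.isPrefixOf]; exact fun hxc => hx (by simpa using hxc.symm)
        rw [if_neg (by simp [this])]
        rw [ih t (x :: acc) (by simpa using Nat.le_of_succ_le_succ h)]
        simp [hx]

theorem replace_single (c : Char) (l : List Char) :
    PySem.Chars.replace l [c] [] = l.filter (fun x => x != c) := by
  unfold PySem.Chars.replace
  simp only [List.isEmpty_cons]
  rw [replace_go_single c l.length l [] (le_refl _)]
  simp

theorem foldl_replace_eq_filter (ps : List Char) : ∀ (l : List Char),
    ps.foldl (fun k c => PySem.Chars.replace k [c] []) l
      = l.filter (fun x => !(ps.contains x)) := by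
  induction ps with
  | nil => intro l; simp
  | cons c t ih =>
    intro l
    simp only [List.foldl_cons]
    rw [replace_single, ih, List.filter_filter]
    congr 1
    funext x
    by_cases hx : x = c <;> simp [hx]

theorem str_foldl_replace (ps : List Char) : ∀ (s : String),
    (ps.foldl (fun k ch => PySem.Str.replace k (String.ofList [ch]) "") s).toList
      = ps.foldl (fun k c => PySem.Chars.replace k [c] []) s.toList := by
  induction ps with
  | nil => intro s; simp
  | cons c t ih =>
    intro s
    simp only [List.foldl_cons]
    rw [ih]
    congr 1
    rw [PySem.Str.toList_replace]
    simp

-- B's join of single-char strings is the identity on the char list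
theorem join_singletons (l : List Char) :
    (PySem.Str.join "" (l.map (fun c => String.ofList [c]))).toList = l := by
  rw [PySem.Str.toList_join]
  have h : (l.map (fun c => String.ofList [c])).map String.toList = l.map (fun c => [c]) := by
    simp [List.map_map, Function.comp]
  simp only [h]
  exact PySem.Chars.join_nil_singletons l

theorem set_ofList_contains (ps : List Char) (c : Char) :
    (PySem.Set.ofList ps).contains c = ps.contains c := by
  simp [PySem.Set.mem_ofList]

-- the per-word result of A equals the per-word result of B
theorem word_eq (kata : String) :
    PySem.Str.lower (pvPunct.toList.foldl
        (fun k ch => PySem.Str.replace k (String.ofList [ch]) "") kata)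
      = PySem.Str.lower (PySem.Str.join ""
          ((kata.toList.filter (fun c => !((PySem.Set.ofList pvPunct.toList).contains c))).map
            (fun c => String.ofList [c]))) := by
  have h1 : (pvPunct.toList.foldl
      (fun k ch => PySem.Str.replace k (String.ofList [ch]) "") kata).toList
      = kata.toList.filter (fun x => !(pvPunct.toList.contains x)) := by
    rw [str_foldl_replace, foldl_replace_eq_filter]
  have h2 : (PySem.Str.join ""
      ((kata.toList.filter (fun c => !((PySem.Set.ofList pvPunct.toList).contains c))).map
        (fun c => String.ofList [c]))).toList
      = kata.toList.filter (fun x => !(pvPunct.toList.contains x)) := by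
    rw [join_singletons]
    simp only [set_ofList_contains]
  exact congrArg PySem.Str.lower (String.toList_inj.mp (h1.trans h2.symm))

-- A's foldl over a pair state, projected, is a map
theorem foldA_eq (f g : String → String) (teks : List String) :
    ∀ (r : List String) (k : String),
      (teks.foldl (fun st kata => (st.1 ++ [f kata], g kata)) (r, k)).1
        = r ++ teks.map f := by
  induction teks with
  | nil => intro r k; simp
  | cons x t ih => intro r k; simp [ih]

theorem foldB_eq (f : String → String) (teks : List String) :
    ∀ (r : List String),
      teks.foldl (fun ret kata => ret ++ [f kata]) r = r ++ teks.map f := by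
  induction teks with
  | nil => intro r; simp
  | cons x t ih => intro r; simp [ih]

-- ===== VERDICT (by name: the statement is the Claim_ definition above) =====
theorem buang_tanda_spec : Claim_equal_buang_tanda := by
  intro teks _
  unfold Spec_buang_tanda buang_tanda buang_tanda_alt
  simp only []
  rw [foldA_eq
        (fun kata => PySem.Str.lower (pvPunct.toList.foldl
          (fun k ch => PySem.Str.replace k (String.ofList [ch]) "") kata))
        (fun kata => pvPunct.toList.foldl
          (fun k ch => PySem.Str.replace k (String.ofList [ch]) "") kata),
      foldB_eq]
  simp only [List.nil_append]
  exact List.map_congr_left (fun kata _ => word_eq kata)
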